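-- pv_equiv track=rewrite | github.com/rtm2130/SPOTree | Applications/Yahoo News/spo_opt_tree_news.py | find_ancestors
-- ===== SOURCE A (Python) =====
-- def find_parent_index(t):
--   return (t+1)//2 - 1
--
-- def find_ancestors(t):
--     l= []
--     r = []
--     if t == 0:
--         return
--     else:
--         while find_parent_index(t) !=0:
--             parent = find_parent_index(t)
--             if (t+1)% (1+parent) ==1:
--                 r.append(parent)
--             else:
--                 l.append(parent)
--             t = parent
--         if t==2:
--             r.append(0)
--         else:
--             l.append(0)
--     return[l,r]
-- ===== SOURCE B (Python) =====
-- def _value(bs):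
--     v = 0
--     for b in bs:
--         v = 2 * v + b
--     return v
--
-- def find_ancestors(t):
--     if t == 0:
--         return
--     # binary digits of t+1, most significant first
--     bits = []
--     m = t + 1
--     while m > 0:
--         bits.append(m % 2)
--         m //= 2
--     bits.reverse()
--     l = []
--     r = []
--     j = len(bits) - 1
--     while j > 0:
--         anc = _value(bits[:j]) - 1
--         if bits[j] == 1:
--             r.append(anc)
--         else:
--             l.append(anc)
--         j -= 1
--     return [l, r]
-- ===== Notes on version B (the rewrite author's own statement) =====
-- stated objective: alternative
-- what changed: A repeatedly recomputes the parent index and classifies each step by a variable-modulus test with a special-cased final root step; B instead computes the binary digit list of the successor of t once and reads every ancestor and its left/right side directly off the digit prefixes in a single uniform pass with no special case.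
import Mathlib
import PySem

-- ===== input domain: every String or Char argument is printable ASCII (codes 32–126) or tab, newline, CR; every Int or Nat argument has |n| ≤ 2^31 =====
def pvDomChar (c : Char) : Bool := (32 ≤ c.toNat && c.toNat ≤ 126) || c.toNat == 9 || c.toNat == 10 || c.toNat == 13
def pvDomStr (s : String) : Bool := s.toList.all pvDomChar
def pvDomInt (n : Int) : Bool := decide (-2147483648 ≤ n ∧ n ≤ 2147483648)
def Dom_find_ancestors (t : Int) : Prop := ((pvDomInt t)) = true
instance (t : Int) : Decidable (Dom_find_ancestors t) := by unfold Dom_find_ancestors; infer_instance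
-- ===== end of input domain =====

-- B replaces A's parent-walk (parent recomputation + variable-modulus child test per step,
-- plus a special-cased final root step) by one pass computing the binary digit list of t+1
-- and a uniform pass over its proper prefixes; objective: alternative.
-- On negative t the Python A raises ZeroDivisionError or loops forever: Pre_ excludes negative t.


-- ===== PORT A =====
def find_parent_index (t : Int) : Int := PySem.Int.floordiv (t + 1) 2 - 1

-- the while loop of A; fuel t.toNat is enough iterations for every t ≥ 1 (the index strictly decreases)
def pvFindLoop : Nat → Int → List Int → List Int → Int × List Int × List Int
  | 0, t, l, r => (t, l, r)
  | f + 1, t, l, r =>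
    if find_parent_index t ≠ 0 then
      let parent := find_parent_index t
      if PySem.Int.mod (t + 1) (1 + parent) = 1 then
        pvFindLoop f parent l (r ++ [parent])
      else
        pvFindLoop f parent (l ++ [parent]) r
    else (t, l, r)

def find_ancestors (t : Int) : Option (List (List Int)) :=
  if t = 0 then none
  else
    let s := pvFindLoop t.toNat t [] []
    if s.1 = 2 then some [s.2.1, s.2.2 ++ [0]] else some [s.2.1 ++ [0], s.2.2]

-- ===== PORT B =====
-- Source B's _value: int value of a most-significant-first digit list
def pvValue (bs : List Int) : Int := bs.foldl (fun v b => 2 * v + b) 0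

-- Source B's first while loop: append m % 2, m //= 2 while m > 0; fuel m.toNat suffices
def pvBitsLoop : Nat → Int → List Int → List Int
  | 0, _, bits => bits
  | f + 1, m, bits =>
    if 0 < m then pvBitsLoop f (PySem.Int.floordiv m 2) (bits ++ [PySem.Int.mod m 2])
    else bits

-- Source B's second while loop over j = len(bits)-1 .. 1 (Lean pattern j+1 is Python's j);
-- bits[:j] = take, bits[j] = pyGetD (0 ≤ j < len(bits) throughout)
def pvAltLoop (bits : List Int) : Nat → List Int → List Int → List Int × List Int
  | 0, l, r => (l, r)
  | j + 1, l, r =>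
    let anc := pvValue (bits.take (j + 1)) - 1
    if PySem.List.pyGetD bits ((j : Int) + 1) 0 = 1 then
      pvAltLoop bits j l (r ++ [anc])
    else
      pvAltLoop bits j (l ++ [anc]) r

def find_ancestors_alt (t : Int) : Option (List (List Int)) :=
  if t = 0 then none
  else
    let bits := (pvBitsLoop (t + 1).toNat (t + 1) []).reverse
    let p := pvAltLoop bits (bits.length - 1) [] []
    some [p.1, p.2]

-- ===== PRECONDITION & SPEC =====
-- On negative t the Python A raises ZeroDivisionError or loops forever, so Pre_ excludes negative t.
def Pre_find_ancestors (t : Int) : Prop := 0 ≤ t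
instance (t : Int) : Decidable (Pre_find_ancestors t) := by unfold Pre_find_ancestors; infer_instance
def pvWitness_find_ancestors : Int := (5)

def Spec_find_ancestors (t : Int) (out : Option (List (List Int))) : Prop := out = find_ancestors_alt t
instance (t : Int) (out : Option (List (List Int))) : Decidable (Spec_find_ancestors t out) := by unfold Spec_find_ancestors; infer_instance

-- ===== CLAIM (what is proved, stated in full; the proofs are below) =====
def Claim_equal_find_ancestors : Prop := ∀ (t : Int), Dom_find_ancestors t → Pre_find_ancestors t → Spec_find_ancestors t (find_ancestors t)

-- ===== LEMMAS AND PROOFS =====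

-- the node at which A's loop stops (1 or 2), as a function of the start index
def lastN : Nat → Nat
  | 0 => 0
  | 1 => 1
  | 2 => 2
  | n + 3 => lastN ((n + 2) / 2)
decreasing_by exact Nat.lt_succ_of_le (Nat.div_le_self _ _)

-- the (left, right) ancestor lists collected by A's loop (without the final 0)
def pvWl : Nat → List Int × List Int
  | 0 => ([], [])
  | 1 => ([], [])
  | 2 => ([], [])
  | n + 3 =>
    let p := (n + 2) / 2
    let w := pvWl p
    if (n + 3) % 2 = 0 then (w.1, (p : Int) :: w.2) else ((p : Int) :: w.1, w.2)
decreasing_by exact Nat.lt_succ_of_le (Nat.div_le_self _ _)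

-- the full (left, right) ancestor lists including the root 0
def pvT : Nat → List Int × List Int
  | 0 => ([], [])
  | 1 => ([0], [])
  | 2 => ([], [0])
  | n + 3 =>
    let p := (n + 2) / 2
    let w := pvT p
    if (n + 3) % 2 = 0 then (w.1, (p : Int) :: w.2) else ((p : Int) :: w.1, w.2)
decreasing_by exact Nat.lt_succ_of_le (Nat.div_le_self _ _)

-- binary digits (as Ints 0/1) of n, most significant first
def rbits : Nat → List Int
  | 0 => []
  | n + 1 => rbits ((n + 1) / 2) ++ [(((n + 1) % 2 : Nat) : Int)]
decreasing_by exact Nat.div_lt_self (Nat.succ_pos n) one_lt_two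

lemma pvT_eq_pvWl (n : Nat) (h : 1 ≤ n) :
    pvT n = (if lastN n = 2 then ((pvWl n).1, (pvWl n).2 ++ [0]) else ((pvWl n).1 ++ [0], (pvWl n).2)) := by
  induction n using Nat.strong_induction_on with
  | _ n ih =>
    match n, h with
    | 1, _ => simp [pvT, pvWl, lastN]
    | 2, _ => simp [pvT, pvWl, lastN]
    | (m+3), _ =>
      have hdiv : (m+2)/2 = m/2+1 := by omega
      have hrec := ih (m/2+1) (by omega) (by omega)
      simp only [pvT, pvWl, lastN, hdiv, hrec]
      by_cases h2 : lastN (m/2+1) = 2 <;> by_cases hm : (m+3) % 2 = 0 <;>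
        simp [h2, hm]

lemma find_parent_eq (n : Nat) (h : 1 ≤ n) :
    find_parent_index (n : Int) = (((n - 1) / 2 : Nat) : Int) := by
  unfold find_parent_index
  rw [show ((n : Int) + 1) = ((n + 1 : Nat) : Int) by push_cast; ring,
      show (2 : Int) = ((2 : Nat) : Int) from rfl, PySem.Int.floordiv_natCast]
  omega

lemma mod_test (n p : Nat) (h3 : 3 ≤ n) (hp : p = (n - 1) / 2) :
    (PySem.Int.mod ((n : Int) + 1) (1 + (p : Int)) = 1) ↔ n % 2 = 0 := by
  rw [show ((n : Int) + 1) = ((n + 1 : Nat) : Int) by push_cast; ring,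
      show (1 + (p : Int)) = ((1 + p : Nat) : Int) by push_cast; ring,
      PySem.Int.mod_natCast]
  rcases (show n = 2 * p + 1 ∨ n = 2 * p + 2 by omega) with rfl | rfl
  · rw [show 2 * p + 1 + 1 = (1 + p) * 2 by ring, Nat.mul_mod_right]
    simp
  · rw [show 2 * p + 2 + 1 = 1 + (1 + p) * 2 by ring, Nat.add_mul_mod_self_left,
        Nat.mod_eq_of_lt (by omega)]
    simp

lemma pvFindLoop_spec (f : Nat) : ∀ (n : Nat) (l r : List Int), 1 ≤ n → n ≤ f →
    pvFindLoop f (n : Int) l r = ((lastN n : Int), l ++ (pvWl n).1, r ++ (pvWl n).2) := by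
  induction f with
  | zero => intro n l r h1 h2; omega
  | succ f ih =>
    intro n l r h1 _
    match n, h1 with
    | 1, _ => simp [pvFindLoop, show find_parent_index (1:Int) = 0 from by decide, lastN, pvWl]
    | 2, _ => simp [pvFindLoop, show find_parent_index (2:Int) = 0 from by decide, lastN, pvWl]
    | (m+3), _ =>
      have hpar := find_parent_eq (m+3) (by omega)
      have hdiv : (m+3-1)/2 = m/2+1 := by omega
      rw [hdiv] at hpar
      have hmt := mod_test (m+3) (m/2+1) (by omega) (by omega)
      simp only [pvFindLoop, hpar]
      rw [if_pos (by exact_mod_cast (by omega : (m/2+1 : Int) ≠ 0))]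
      have hrec := fun l r => ih (m/2+1) l r (by omega) (by omega)
      by_cases hm : (m+3) % 2 = 0
      · rw [if_pos (hmt.mpr hm), hrec]
        have hdiv2 : (m+2)/2 = m/2+1 := by omega
        simp [pvWl, lastN, hdiv2, hm]
      · rw [if_neg (fun hc => hm (hmt.mp hc)), hrec]
        have hdiv2 : (m+2)/2 = m/2+1 := by omega
        simp [pvWl, lastN, hdiv2, hm]

lemma pvBitsLoop_spec (f : Nat) : ∀ (n : Nat) (acc : List Int), 1 ≤ n → n ≤ f →
    pvBitsLoop f (n : Int) acc = acc ++ (rbits n).reverse := by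
  induction f with
  | zero => intro n acc h1 h2; omega
  | succ f ih =>
    intro n acc h1 _
    have hfd : PySem.Int.floordiv (n : Int) 2 = ((n / 2 : Nat) : Int) := by
      exact_mod_cast PySem.Int.floordiv_natCast n 2
    have hmd : PySem.Int.mod (n : Int) 2 = ((n % 2 : Nat) : Int) := by
      exact_mod_cast PySem.Int.mod_natCast n 2
    match n, h1 with
    | (m+1), _ =>
      simp only [pvBitsLoop, hfd, hmd]
      rw [if_pos (by exact_mod_cast Nat.succ_pos m)]
      rcases Nat.eq_zero_or_pos ((m+1)/2) with hz | hpos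
      · rw [hz]
        have : ∀ g acc', pvBitsLoop g ((0:Nat):Int) acc' = acc' := by
          intro g acc'; cases g <;> simp [pvBitsLoop]
        rw [this]
        rw [show rbits (m+1) = rbits ((m+1)/2) ++ [(((m+1) % 2 : Nat) : Int)] from by rw [rbits], hz]
        simp [rbits]
      · rw [ih ((m+1)/2) _ hpos (by omega)]
        rw [show rbits (m+1) = rbits ((m+1)/2) ++ [(((m+1) % 2 : Nat) : Int)] from by rw [rbits]]
        simp

lemma pvValue_rbits (n : Nat) : pvValue (rbits n) = n := by
  induction n using Nat.strong_induction_on with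
  | _ n ih =>
    match n with
    | 0 => simp [rbits, pvValue]
    | (m+1) =>
      rw [show rbits (m+1) = rbits ((m+1)/2) ++ [(((m+1) % 2 : Nat) : Int)] from by rw [rbits]]
      have hv := ih ((m+1)/2) (by omega)
      simp only [pvValue, List.foldl_append, List.foldl] at hv ⊢
      rw [hv]
      push_cast
      omega

lemma rbits_length_pos (n : Nat) (h : 1 ≤ n) : 1 ≤ (rbits n).length := by
  match n, h with
  | (m+1), _ =>
    rw [show rbits (m+1) = rbits ((m+1)/2) ++ [(((m+1) % 2 : Nat) : Int)] from by rw [rbits]]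
    simp

lemma pvAltLoop_strip (b : Int) (bs : List Int) : ∀ (j : Nat) (l r : List Int), j < bs.length →
    pvAltLoop (bs ++ [b]) j l r = pvAltLoop bs j l r := by
  intro j
  induction j with
  | zero => intro l r _; simp [pvAltLoop]
  | succ j ihj =>
    intro l r hlen
    have htake : (bs ++ [b]).take (j+1) = bs.take (j+1) :=
      List.take_append_of_le_length (by omega)
    have hget : PySem.List.pyGetD (bs ++ [b]) ((j:Int)+1) 0 = PySem.List.pyGetD bs ((j:Int)+1) 0 := by
      rw [show ((j:Int)+1) = ((j+1:Nat):Int) by push_cast; ring,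
          PySem.List.pyGetD_natCast, PySem.List.pyGetD_natCast,
          List.getD_append _ _ _ _ (by omega)]
    simp only [pvAltLoop, htake, hget]
    by_cases hb : PySem.List.pyGetD bs ((j:Int)+1) 0 = 1 <;> simp [hb, ihj _ _ (by omega)]

lemma pvAltLoop_spec (n : Nat) (h : 1 ≤ n) : ∀ (l r : List Int),
    pvAltLoop (rbits (n + 1)) ((rbits (n + 1)).length - 1) l r = (l ++ (pvT n).1, r ++ (pvT n).2) := by
  induction n using Nat.strong_induction_on with
  | _ n ih =>
    match n, h with
    | 1, _ =>
      intro l r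
      have h2 : rbits 2 = [1, 0] := by norm_num [rbits]
      simp [h2, pvAltLoop, pvValue, PySem.List.pyGetD, PySem.List.pyIdx?, PySem.List.pyGet?, pvT]
    | 2, _ =>
      intro l r
      have h3 : rbits 3 = [1, 1] := by norm_num [rbits]
      simp [h3, pvAltLoop, pvValue, PySem.List.pyGetD, PySem.List.pyIdx?, PySem.List.pyGet?, pvT]
    | (m+3), _ =>
      intro l r
      have hsplit : rbits (m+3+1) = rbits (m/2+1+1) ++ [(((m+4) % 2 : Nat) : Int)] := by
        rw [show m+3+1 = (m+3)+1 from rfl, rbits, show (m+3+1)/2 = m/2+1+1 by omega]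
      obtain ⟨k, hk⟩ : ∃ k, (rbits (m/2+1+1)).length = k + 1 :=
        ⟨(rbits (m/2+1+1)).length - 1, by have := rbits_length_pos (m/2+1+1) (by omega); omega⟩
      have hlen : (rbits (m/2+1+1) ++ [(((m+4) % 2 : Nat) : Int)]).length - 1 = k + 1 := by
        simp [hk]
      rw [hsplit, hlen]
      have htake : (rbits (m/2+1+1) ++ [(((m+4) % 2 : Nat) : Int)]).take (k+1) = rbits (m/2+1+1) := by
        rw [← hk]; exact List.take_left
      have hval : pvValue (rbits (m/2+1+1)) = ((m/2+1+1 : Nat) : Int) := pvValue_rbits _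
      have hget : PySem.List.pyGetD (rbits (m/2+1+1) ++ [(((m+4) % 2 : Nat) : Int)]) ((k:Int)+1) 0
          = (((m+4) % 2 : Nat) : Int) := by
        rw [show ((k:Int)+1) = ((k+1:Nat):Int) by push_cast; ring, PySem.List.pyGetD_natCast,
            List.getD_append_right _ _ _ _ (by omega)]
        simp [hk]
      have hstrip := pvAltLoop_strip (((m+4) % 2 : Nat) : Int) (rbits (m/2+1+1))
      have hrec := fun l r => ih (m/2+1) (by omega) (by omega) l r
      simp only [hk, Nat.add_sub_cancel] at hrec
      simp only [pvAltLoop, htake, hget, hval]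
      have hanc : ((m/2+1+1 : Nat) : Int) - 1 = ((m/2+1 : Nat) : Int) := by push_cast; ring
      rw [hanc]
      have hT : pvT (m+3) = (let p := (m+2)/2; let w := pvT p;
          if (m+3) % 2 = 0 then (w.1, (p : Int) :: w.2) else ((p : Int) :: w.1, w.2)) := by
        rw [pvT]
      rw [show (m+2)/2 = m/2+1 by omega] at hT
      by_cases hm : (m+3) % 2 = 0
      · rw [if_pos (by exact_mod_cast (by omega : ((m+4) % 2 : Int) = 1))]
        rw [hstrip k _ _ (by omega), hrec]
        simp [hT, hm]
      · rw [if_neg (by exact_mod_cast (by omega : ¬ ((m+4) % 2 : Int) = 1))]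
        rw [hstrip k _ _ (by omega), hrec]
        simp [hT, hm]

lemma find_ancestors_eq_pvT (n : Nat) (h : 1 ≤ n) :
    find_ancestors (n : Int) = some [(pvT n).1, (pvT n).2] := by
  have hs := pvFindLoop_spec n n [] [] h (le_refl n)
  simp only [find_ancestors, Int.toNat_natCast, hs]
  rw [if_neg (show ¬ ((n:Int) = 0) from by exact_mod_cast (by omega : ¬ n = 0))]
  by_cases h2 : lastN n = 2
  · rw [if_pos (show ((lastN n : Nat) : Int) = 2 from by exact_mod_cast h2)]
    simp [pvT_eq_pvWl n h, h2]
  · rw [if_neg (show ¬ ((lastN n : Nat) : Int) = 2 from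
      fun hc => h2 (by exact_mod_cast hc))]
    simp [pvT_eq_pvWl n h, h2]

lemma find_ancestors_alt_eq_pvT (n : Nat) (h : 1 ≤ n) :
    find_ancestors_alt (n : Int) = some [(pvT n).1, (pvT n).2] := by
  have hb := pvBitsLoop_spec (n+1) (n+1) [] (by omega) (le_refl _)
  simp only [find_ancestors_alt]
  rw [if_neg (show ¬ ((n:Int) = 0) from by exact_mod_cast (by omega : ¬ n = 0)),
      show ((n:Int)+1) = ((n+1:Nat):Int) from by push_cast; ring,
      Int.toNat_natCast, hb]
  simp only [List.nil_append, List.reverse_reverse]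
  rw [pvAltLoop_spec n h [] []]
  simp

-- ===== VERDICT (by name: the statement is the Claim_ definition above) =====
theorem find_ancestors_spec : Claim_equal_find_ancestors := by
  intro t _ hpre
  unfold Spec_find_ancestors
  rcases eq_or_lt_of_le hpre with h0 | h1
  · simp [find_ancestors, find_ancestors_alt, ← h0]
  · obtain ⟨n, hn1, rfl⟩ : ∃ n : Nat, 1 ≤ n ∧ t = (n : Int) :=
      ⟨t.toNat, by omega, by omega⟩
    rw [find_ancestors_eq_pvT n hn1, find_ancestors_alt_eq_pvT n hn1]
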